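-- pv_equiv track=rewrite | github.com/akesling/galaxypad | lib/ops.py | int_to_grid
-- ===== SOURCE A (Python) =====
-- import math
--
-- def int_to_grid(number):
--     bin_string = '{0:b}'.format(abs(number))
--     negative = number < 0
--     size = int(math.ceil(math.sqrt(len(bin_string))))
--     grid = [[0]*(size+1) for i in range(size + 1 + (negative*1))]
--
--     for i in range(len(grid[0])):
--         grid[0][i] = 1
--     for row in grid:
--         row[0] = 1
--     grid[0][0] = 0
--
--     for i, char in enumerate(reversed(list(bin_string))):
--         row = (i // size) + 1
--         col = (i % size) + 1
--         grid[row][col] = int(char)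
--
--     return grid
-- ===== SOURCE B (Python) =====
-- import math
--
-- def int_to_grid(number):
--     n = abs(number)
--     bits = []  # binary digits of abs(number), least-significant first
--     while True:
--         bits.append(n % 2)
--         n //= 2
--         if n == 0:
--             break
--     size = math.isqrt(len(bits))
--     if size * size < len(bits):
--         size += 1
--     bits += [0] * (size * size - len(bits))
--     grid = [[0] + [1] * size]
--     for r in range(size):
--         grid.append([1] + bits[r * size:(r + 1) * size])
--     if number < 0:
--         grid.append([1] + [0] * size)
--     return grid
-- ===== Notes on version B (the rewrite author's own statement) =====
-- stated objective: simpler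
-- what changed: B computes the LSB-first bit list directly by integer division (no string formatting or reversal), uses integer isqrt instead of float ceil/sqrt, pads the bit list to size*size and assembles each row as a slice of it, instead of preallocating a zero grid and mutating it with three border loops plus an index-scatter loop.
import Mathlib
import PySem

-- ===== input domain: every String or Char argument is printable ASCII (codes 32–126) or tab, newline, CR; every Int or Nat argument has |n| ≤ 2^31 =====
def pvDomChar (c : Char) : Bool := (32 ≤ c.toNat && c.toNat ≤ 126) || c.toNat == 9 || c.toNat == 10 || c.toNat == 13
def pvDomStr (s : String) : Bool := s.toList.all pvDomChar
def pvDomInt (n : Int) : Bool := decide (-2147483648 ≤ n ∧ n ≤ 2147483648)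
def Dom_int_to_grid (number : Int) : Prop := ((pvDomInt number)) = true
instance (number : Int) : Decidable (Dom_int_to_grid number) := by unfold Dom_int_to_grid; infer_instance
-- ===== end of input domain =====

-- B builds the grid row by row from slices of the padded LSB-first bit list (computed by
-- integer division and integer isqrt) instead of A's preallocated grid mutated by border
-- loops and an index-scatter loop; objective: simpler.  Both programs are pure (A mutates
-- only lists it allocates itself).

-- ===== PORT A =====
-- '{0:b}'.format(m): binary digits MSB first; A immediately applies int(char) to each
-- digit, so the digits are carried as Int from the start (exact: digits are '0'/'1').
def pvBinDigits (n : Nat) : List Int :=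
  if h : n = 0 then []
  else pvBinDigits (n / 2) ++ [((n % 2 : Nat) : Int)]
decreasing_by exact Nat.div_lt_self (Nat.pos_of_ne_zero h) one_lt_two

def pvFormatBin (m : Nat) : List Int := if m = 0 then [0] else pvBinDigits m

-- int(math.ceil(math.sqrt(L))): exact, since on the domain L ≤ 33 and math.sqrt is
-- exact enough there that its ceiling is the integer ceiling square root.
def pvCeilSqrt (L : Nat) : Nat :=
  if Nat.sqrt L * Nat.sqrt L = L then Nat.sqrt L else Nat.sqrt L + 1

def int_to_grid (number : Int) : List (List Int) :=
  let bin_string := pvFormatBin number.natAbs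
  let negative : Bool := decide (number < 0)
  let size := pvCeilSqrt bin_string.length
  let grid : List (List Int) :=
    (List.range (size + 1 + (if negative then 1 else 0))).map
      (fun _ => List.replicate (size + 1) (0 : Int))
  -- for i in range(len(grid[0])): grid[0][i] = 1
  let grid := (List.range ((grid.headD []).length)).foldl
      (fun g i => g.modify 0 (fun row => row.set i 1)) grid
  -- for row in grid: row[0] = 1
  let grid := grid.map (fun row => row.set 0 1)
  -- grid[0][0] = 0
  let grid := grid.modify 0 (fun row => row.set 0 0)
  -- enumerate(reversed(list(bin_string))): indices are nonnegative and size ≥ 1,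
  -- so Nat zipIdx and Nat / , % coincide with Python's enumerate, //, %.
  (bin_string.reverse.zipIdx).foldl
      (fun g p => g.modify (p.2 / size + 1) (fun row => row.set (p.2 % size + 1) p.1)) grid

-- ===== PORT B =====
-- the do-while loop of Source B: append n % 2, n //= 2, stop when n == 0 (LSB first)
def pvBitsLSB (n : Nat) : List Int :=
  if h : n / 2 = 0 then [((n % 2 : Nat) : Int)]
  else ((n % 2 : Nat) : Int) :: pvBitsLSB (n / 2)
decreasing_by
  exact Nat.div_lt_self (Nat.pos_of_ne_zero (fun h0 => h (by simp [h0]))) one_lt_two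

def int_to_grid_alt (number : Int) : List (List Int) :=
  let bits := pvBitsLSB number.natAbs
  -- math.isqrt = Nat.sqrt
  let size0 := Nat.sqrt bits.length
  let size := if size0 * size0 < bits.length then size0 + 1 else size0
  let padded := bits ++ List.replicate (size * size - bits.length) (0 : Int)
  let grid := [(0 : Int) :: List.replicate size 1]
  -- bits[r*size:(r+1)*size] with nonnegative in-range bounds = drop/take
  let grid := grid ++ (List.range size).map
      (fun r => (1 : Int) :: (padded.drop (r * size)).take size)
  if number < 0 then grid ++ [(1 : Int) :: List.replicate size 0] else grid

-- ===== PRECONDITION & SPEC =====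
def Spec_int_to_grid (number : Int) (out : List (List Int)) : Prop := out = int_to_grid_alt number
instance (number : Int) (out : List (List Int)) : Decidable (Spec_int_to_grid number out) := by unfold Spec_int_to_grid; infer_instance

-- ===== CLAIM (what is proved, stated in full; the proofs are below) =====
def Claim_equal_int_to_grid : Prop := ∀ (number : Int), Dom_int_to_grid number → Spec_int_to_grid number (int_to_grid number)

-- ===== LEMMAS AND PROOFS =====

-- reversing A's MSB-first digit string gives B's LSB-first bit list
theorem pvBinDigits_zero : pvBinDigits 0 = [] := by rw [pvBinDigits]; simp

theorem pvBinDigits_reverse (n : Nat) (hn : 0 < n) :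
    (pvBinDigits n).reverse = pvBitsLSB n := by
  induction n using Nat.strong_induction_on with
  | _ n ih =>
    rw [pvBinDigits, dif_neg (by omega : ¬ n = 0), pvBitsLSB]
    by_cases h2 : n / 2 = 0
    · simp [h2, pvBinDigits_zero]
    · simp [h2, List.reverse_append,
        ih (n / 2) (Nat.div_lt_self hn one_lt_two) (Nat.pos_of_ne_zero h2)]

theorem pvFormatBin_reverse (m : Nat) : (pvFormatBin m).reverse = pvBitsLSB m := by
  rw [pvFormatBin]
  by_cases hm : m = 0
  · subst hm; rw [pvBitsLSB]; simp
  · rw [if_neg hm]; exact pvBinDigits_reverse m (Nat.pos_of_ne_zero hm)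

theorem pvBitsLSB_ne_nil (n : Nat) : pvBitsLSB n ≠ [] := by
  rw [pvBitsLSB]; split <;> simp

theorem pvCeilSqrt_eq (L : Nat) :
    pvCeilSqrt L = (if Nat.sqrt L * Nat.sqrt L < L then Nat.sqrt L + 1 else Nat.sqrt L) := by
  have h := Nat.sqrt_le' L
  rw [pvCeilSqrt]
  split <;> split <;> first | rfl | (exfalso; rw [pow_two] at h; omega)

theorem le_pvCeilSqrt_sq (L : Nat) : L ≤ pvCeilSqrt L * pvCeilSqrt L := by
  have h1 := Nat.sqrt_le' L
  have h2 := Nat.lt_succ_sqrt' L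
  rw [pow_two] at h1 h2
  rw [pvCeilSqrt]; split <;> [omega; (simp only [Nat.succ_eq_add_one] at h2; omega)]

theorem pvCeilSqrt_pos (L : Nat) (hL : 0 < L) : 0 < pvCeilSqrt L := by
  rw [pvCeilSqrt]; split
  · exact Nat.sqrt_pos.mpr hL
  · omega

-- lift a fold that mutates only row 0 through the cons
theorem foldl_modify_head (f : Nat → List Int → List Int) :
    ∀ (l : List Nat) (a : List Int) (rest : List (List Int)),
      l.foldl (fun g i => g.modify 0 (f i)) (a :: rest)
        = (l.foldl (fun r i => f i r) a) :: rest := by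
  intro l
  induction l with
  | nil => intro a rest; rfl
  | cons x xs ih => intro a rest; simp only [List.foldl_cons, List.modify_zero_cons]; exact ih _ _

-- for i in range(m): row[i] = 1   on a zero row of length n
theorem rowFill (m n : Nat) (h : m ≤ n) :
    (List.range m).foldl (fun (r : List Int) i => r.set i 1) (List.replicate n 0)
      = List.replicate m (1 : Int) ++ List.replicate (n - m) 0 := by
  induction m with
  | zero => simp
  | succ m ih =>
    rw [List.range_succ, List.foldl_append, ih (by omega)]
    simp only [List.foldl_cons, List.foldl_nil]
    rw [List.set_append, if_neg (by simp), List.length_replicate, Nat.sub_self]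
    rw [show n - m = (n - m - 1) + 1 from by omega, List.replicate_succ, List.set_cons_zero]
    rw [List.replicate_succ' (n := m)]
    rw [List.append_assoc, List.singleton_append]
    congr 2

def pvGet2 (g : List (List Int)) (r c : Nat) : Option Int := g[r]?.bind (fun row => row[c]?)

theorem pvGet2_modify_set (g : List (List Int)) (a b : Nat) (v : Int) (r c : Nat)
    (h : ¬(r = a ∧ c = b)) :
    pvGet2 (g.modify a (fun row => row.set b v)) r c = pvGet2 g r c := by
  unfold pvGet2
  rw [List.getElem?_modify]
  by_cases hra : a = r
  · subst hra
    have hc : ¬ b = c := fun hcb => h ⟨rfl, hcb.symm⟩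
    cases hg : g[a]? with
    | none => simp
    | some row => simp [hc]
  · cases hg : g[r]? with
    | none => simp [hra]
    | some row => simp [hra]

theorem pvGet2_modify_set_self (g : List (List Int)) (a b : Nat) (v : Int)
    (ha : a < g.length) (hb : ∀ (row : List Int), g[a]? = some row → b < row.length) :
    pvGet2 (g.modify a (fun row => row.set b v)) a b = some v := by
  unfold pvGet2
  rw [List.getElem?_modify, List.getElem?_eq_getElem ha]
  have hblt := hb g[a] (List.getElem?_eq_getElem ha)
  simp [hblt]

theorem scatter_length (s : Nat) :
    ∀ (ps : List (Int × Nat)) (g : List (List Int)),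
      (ps.foldl (fun (g : List (List Int)) p => g.modify (p.2 / s + 1) (fun row => row.set (p.2 % s + 1) p.1)) g).length
        = g.length := by
  intro ps
  induction ps with
  | nil => intro g; rfl
  | cons p ps ih => intro g; rw [List.foldl_cons, ih, List.length_modify]

theorem modify_set_rowlen (g : List (List Int)) (a b : Nat) (v : Int) (n : Nat)
    (hg : ∀ (j : Nat) (row : List Int), g[j]? = some row → row.length = n) :
    ∀ (j : Nat) (row : List Int),
      (g.modify a (fun row => row.set b v))[j]? = some row → row.length = n := by
  intro j row hj
  rw [List.getElem?_modify] at hj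
  cases hg0 : g[j]? with
  | none => simp [hg0] at hj
  | some row0 =>
    rw [hg0] at hj
    simp only [Option.map_eq_map, Option.map_some] at hj
    have hlen := hg j row0 hg0
    split at hj <;> (cases hj; simp [List.length_set, hlen])

-- the scatter loop, characterised pointwise
theorem scatter_get2 (s : Nat) (hs : 0 < s) :
    ∀ (tl : List Int) (k : Nat) (g : List (List Int)),
      k + tl.length ≤ s * s →
      s + 1 ≤ g.length →
      (∀ (j : Nat) (row : List Int), g[j]? = some row → row.length = s + 1) →
      ∀ r c,
        pvGet2 ((tl.zipIdx k).foldl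
            (fun (g : List (List Int)) p => g.modify (p.2 / s + 1) (fun row => row.set (p.2 % s + 1) p.1)) g) r c
          = if 1 ≤ r ∧ 1 ≤ c ∧ c ≤ s ∧ k ≤ (r-1)*s+(c-1) ∧ (r-1)*s+(c-1) < k + tl.length
            then tl[((r-1)*s+(c-1)) - k]?
            else pvGet2 g r c := by
  intro tl
  induction tl with
  | nil =>
    intro k g _ _ _ r c
    rw [List.zipIdx_nil, List.foldl_nil, List.length_nil]
    have hic : ¬ (1 ≤ r ∧ 1 ≤ c ∧ c ≤ s ∧ k ≤ (r-1)*s+(c-1) ∧ (r-1)*s+(c-1) < k + 0) := by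
      rintro ⟨_, _, _, h4, h5⟩; omega
    rw [if_neg hic]
  | cons b tl ih =>
    intro k g hbnd hglen hrow r c
    rw [List.zipIdx_cons, List.foldl_cons]
    have hlen_cons : (b :: tl).length = tl.length + 1 := List.length_cons
    have hbnd' : (k+1) + tl.length ≤ s * s := by rw [hlen_cons] at hbnd; omega
    have hglen' : s + 1 ≤ (g.modify (k / s + 1) (fun row => row.set (k % s + 1) b)).length := by
      rw [List.length_modify]; exact hglen
    have hrow' := modify_set_rowlen g (k / s + 1) (k % s + 1) b (s+1) hrow
    rw [ih (k+1) _ hbnd' hglen' hrow' r c]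
    by_cases h1 : 1 ≤ r ∧ 1 ≤ c ∧ c ≤ s
    · obtain ⟨h1r, h1c, h1cs⟩ := h1
      by_cases h2 : k ≤ (r-1)*s+(c-1) ∧ (r-1)*s+(c-1) < k + (b :: tl).length
      · obtain ⟨h2a, h2b⟩ := h2
        rw [hlen_cons] at h2b
        by_cases h3 : k + 1 ≤ (r-1)*s+(c-1)
        · rw [if_pos ⟨h1r, h1c, h1cs, h3, by omega⟩, if_pos ⟨h1r, h1c, h1cs, h2a, by rw [hlen_cons]; omega⟩]
          rw [show (r-1)*s+(c-1) - k = ((r-1)*s+(c-1) - (k+1)) + 1 from by omega,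
            List.getElem?_cons_succ]
        · have hik : (r-1)*s+(c-1) = k := by omega
          rw [if_neg (fun hc => h3 hc.2.2.2.1),
            if_pos ⟨h1r, h1c, h1cs, h2a, by rw [hlen_cons]; omega⟩]
          rw [show (r-1)*s+(c-1) - k = 0 from by omega, List.getElem?_cons_zero]
          have hc1s : c - 1 < s := by omega
          have hdiv : k / s = r - 1 := by
            rw [← hik, Nat.add_comm, Nat.mul_comm, Nat.add_mul_div_left _ _ hs,
              Nat.div_eq_of_lt hc1s, Nat.zero_add]
          have hmod : k % s = c - 1 := by
            rw [← hik, Nat.add_comm, Nat.mul_comm, Nat.add_mul_mod_self_left,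
              Nat.mod_eq_of_lt hc1s]
          have hrs : r - 1 < s := by
            by_contra hge
            push_neg at hge
            have h5 : s * s ≤ (r-1) * s := Nat.mul_le_mul_right s hge
            have h6 : (r-1) * s ≤ (r-1)*s+(c-1) := Nat.le_add_right _ _
            omega
          have hr_eq : k / s + 1 = r := by omega
          have hc_eq : k % s + 1 = c := by omega
          rw [hr_eq, hc_eq]
          apply pvGet2_modify_set_self
          · omega
          · intro row hr0
            rw [hrow r row hr0]
            omega
      · have hnc1 : ¬ (1 ≤ r ∧ 1 ≤ c ∧ c ≤ s ∧ k+1 ≤ (r-1)*s+(c-1) ∧ (r-1)*s+(c-1) < (k+1) + tl.length) := by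
          rintro ⟨_, _, _, h4, h5⟩
          exact h2 ⟨by omega, by rw [hlen_cons]; omega⟩
        rw [if_neg hnc1, if_neg (fun hc => h2 ⟨hc.2.2.2.1, hc.2.2.2.2⟩)]
        apply pvGet2_modify_set
        rintro ⟨hr', hc'⟩
        apply h2
        have hik : (r-1)*s+(c-1) = k := by
          rw [hr', hc', Nat.add_sub_cancel, Nat.add_sub_cancel, Nat.mul_comm]
          exact Nat.div_add_mod k s
        constructor
        · omega
        · rw [hlen_cons]; omega
    · rw [if_neg (fun hc => h1 ⟨hc.1, hc.2.1, hc.2.2.1⟩),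
        if_neg (fun hc => h1 ⟨hc.1, hc.2.1, hc.2.2.1⟩)]
      apply pvGet2_modify_set
      rintro ⟨hr', hc'⟩
      apply h1
      have hms : k % s < s := Nat.mod_lt k hs
      refine ⟨?_, ?_, ?_⟩
      · rw [hr']; exact Nat.le_add_left 1 _
      · rw [hc']; exact Nat.le_add_left 1 _
      · rw [hc']; omega

theorem eq_of_get2 (g h : List (List Int)) (hlen : g.length = h.length)
    (hpt : ∀ r c, pvGet2 g r c = pvGet2 h r c) : g = h := by
  apply List.ext_getElem?
  intro r
  by_cases hr : r < g.length
  · have hr' : r < h.length := hlen ▸ hr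
    rw [List.getElem?_eq_getElem hr, List.getElem?_eq_getElem hr']
    have hrow : g[r] = h[r] := by
      apply List.ext_getElem?
      intro c
      have := hpt r c
      unfold pvGet2 at this
      rwa [List.getElem?_eq_getElem hr, List.getElem?_eq_getElem hr',
        Option.bind_some, Option.bind_some] at this
    rw [hrow]
  · rw [List.getElem?_eq_none (by omega), List.getElem?_eq_none (by omega)]

-- scattering the bits into the bordered zero grid gives exactly B's chunked rows
theorem key (s : Nat) (bl : List Int) (neg : Nat) (hs : 1 ≤ s)
    (hL1 : 1 ≤ bl.length) (hLs : bl.length ≤ s * s) (hneg : neg ≤ 1) :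
    (bl.zipIdx 0).foldl
        (fun g p => g.modify (p.2 / s + 1) (fun row => row.set (p.2 % s + 1) p.1))
        (((0 : Int) :: List.replicate s 1) :: List.replicate (s + neg) ((1 : Int) :: List.replicate s 0))
      = (((0 : Int) :: List.replicate s 1) ::
          (List.range s).map (fun r =>
            (1 : Int) :: (((bl ++ List.replicate (s * s - bl.length) 0).drop (r * s)).take s)))
        ++ List.replicate neg ((1 : Int) :: List.replicate s 0) := by
  apply eq_of_get2
  · rw [scatter_length]
    simp only [List.length_cons, List.length_replicate, List.length_append,
      List.length_map, List.length_range]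
    omega
  intro r c
  have hrowsP : ∀ (j : Nat) (row : List Int),
      (((0:Int) :: List.replicate s 1) :: List.replicate (s + neg) ((1:Int) :: List.replicate s 0))[j]?
        = some row → row.length = s + 1 := by
    intro j row hj
    cases j with
    | zero => rw [List.getElem?_cons_zero] at hj; cases hj; simp
    | succ j =>
      rw [List.getElem?_cons_succ, List.getElem?_replicate] at hj
      split at hj
      · cases hj; simp
      · exact absurd hj (by simp)
  rw [scatter_get2 s (by omega) bl 0 _ (by simpa using hLs) (by simp) hrowsP r c]
  simp only [Nat.zero_add, Nat.sub_zero, Nat.zero_le, true_and]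
  cases r with
  | zero =>
    rw [if_neg (by rintro ⟨h, _⟩; omega)]
    unfold pvGet2
    rw [List.getElem?_cons_zero, List.getElem?_append_left (by simp), List.getElem?_cons_zero]
  | succ j =>
    simp only [Nat.add_sub_cancel]
    by_cases hj : j < s
    · have hRHS : pvGet2
          ((((0:Int) :: List.replicate s 1) ::
            (List.range s).map (fun r =>
              (1 : Int) :: (((bl ++ List.replicate (s * s - bl.length) 0).drop (r * s)).take s)))
            ++ List.replicate neg ((1 : Int) :: List.replicate s 0)) (j+1) c
          = ((1:Int) :: (((bl ++ List.replicate (s * s - bl.length) 0).drop (j * s)).take s))[c]? := by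
        unfold pvGet2
        rw [List.getElem?_append_left (by simp; omega), List.getElem?_cons_succ]
        simp [hj]
      have hP : pvGet2
          (((0:Int) :: List.replicate s 1) :: List.replicate (s + neg) ((1:Int) :: List.replicate s 0)) (j+1) c
          = ((1:Int) :: List.replicate s 0)[c]? := by
        unfold pvGet2
        rw [List.getElem?_cons_succ, List.getElem?_replicate, if_pos (by omega), Option.bind_some]
      rw [hRHS, hP]
      cases c with
      | zero =>
        rw [if_neg (by rintro ⟨_, h, _⟩; omega)]
        rw [List.getElem?_cons_zero, List.getElem?_cons_zero]
      | succ c' =>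
        simp only [Nat.add_sub_cancel]
        rw [List.getElem?_cons_succ, List.getElem?_cons_succ, List.getElem?_take]
        by_cases hcs : c' < s
        · rw [if_pos hcs, List.getElem?_drop]
          by_cases hiL : j * s + c' < bl.length
          · rw [if_pos ⟨by omega, by omega, by omega, hiL⟩]
            rw [List.getElem?_append_left hiL]
          · rw [if_neg (by rintro ⟨_, _, _, h⟩; omega)]
            have hlt : j * s + c' < s * s := by
              have h2 : (j+1) * s ≤ s * s := Nat.mul_le_mul_right s (by omega)
              have h3 : (j+1) * s = j * s + s := by rw [Nat.add_mul]; omega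
              omega
            rw [List.getElem?_append_right (by omega), List.getElem?_replicate,
              if_pos (by omega)]
            rw [List.getElem?_replicate, if_pos (by omega)]
        · rw [if_neg hcs, if_neg (by rintro ⟨_, h, _⟩; omega)]
          rw [List.getElem?_replicate, if_neg hcs]
    · rw [if_neg ?ncond]
      case ncond =>
        rintro ⟨_, hc1, hcs', hlt⟩
        have hss : s * s ≤ j * s := Nat.mul_le_mul_right s (by omega)
        omega
      unfold pvGet2
      rw [List.getElem?_cons_succ, List.getElem?_replicate,
        List.getElem?_append_right (by simp; omega)]
      simp only [List.length_cons, List.length_map, List.length_range, List.getElem?_replicate]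
      by_cases hjn : j < s + neg
      · rw [if_pos hjn, if_pos (by omega)]
      · rw [if_neg hjn, if_neg (by omega)]

theorem main_eq (number : Int) : int_to_grid number = int_to_grid_alt number := by
  have hbl := pvFormatBin_reverse number.natAbs
  have hL1 : 1 ≤ (pvBitsLSB number.natAbs).length :=
    List.length_pos_of_ne_nil (pvBitsLSB_ne_nil _)
  have hlenF : (pvFormatBin number.natAbs).length = (pvBitsLSB number.natAbs).length := by
    rw [← hbl, List.length_reverse]
  have hs : 1 ≤ pvCeilSqrt (pvBitsLSB number.natAbs).length := pvCeilSqrt_pos _ hL1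
  have hLs := le_pvCeilSqrt_sq (pvBitsLSB number.natAbs).length
  unfold int_to_grid int_to_grid_alt
  simp only [hlenF, hbl, List.map_const', List.length_range, ← pvCeilSqrt_eq,
    decide_eq_true_eq]
  set bl := pvBitsLSB number.natAbs with hbldef
  set s := pvCeilSqrt bl.length with hsdef
  set ng : Nat := if number < 0 then 1 else 0 with hngdef
  rw [show s + 1 + ng = (s + ng) + 1 from by omega, List.replicate_succ, List.headD_cons,
    List.length_replicate]
  rw [foldl_modify_head (fun i row => row.set i 1)]
  rw [rowFill (s+1) (s+1) le_rfl]
  simp only [Nat.sub_self, List.replicate_zero, List.append_nil]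
  rw [List.map_cons, List.map_replicate]
  rw [List.replicate_succ, List.replicate_succ, List.set_cons_zero, List.set_cons_zero]
  rw [List.modify_zero_cons, List.set_cons_zero]
  rw [key s bl ng hs hL1 hLs (by rw [hngdef]; split_ifs <;> omega)]
  by_cases hneg0 : number < 0
  · rw [if_pos hneg0, hngdef, if_pos hneg0]
    simp [List.replicate_one]
  · rw [if_neg hneg0, hngdef, if_neg hneg0]
    simp [List.replicate_zero]

-- ===== VERDICT (by name: the statement is the Claim_ definition above) =====
theorem int_to_grid_spec : Claim_equal_int_to_grid := by
  intro number _
  unfold Spec_int_to_grid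
  exact main_eq number
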